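-- pv_equiv track=rewrite | github.com/Nithin8919/AI_policy_ASSISTANT__v2 | retrieval_v3/retrieval_core/aggregator.py | merge_by_vertical
-- ===== SOURCE A (Python) =====
-- from typing import List, Dict, Set
-- from collections import defaultdict
--
-- def merge_by_vertical(
--
--     results: List[Dict]
-- ) -> Dict[str, List[Dict]]:
--     """Group results by vertical"""
--     by_vertical = defaultdict(list)
--
--     for result in results:
--         vertical = result.get('vertical', 'unknown')
--         by_vertical[vertical].append(result)
--
--     return dict(by_vertical)
-- ===== SOURCE B (Python) =====
-- def merge_by_vertical(results):
--     """Group results by vertical: first-occurrence key order, one filter pass per key."""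
--     def key(r):
--         return r.get('vertical', 'unknown')
--     order = list(dict.fromkeys(key(r) for r in results))
--     return {v: [r for r in results if key(r) == v] for v in order}
-- ===== Notes on version B (the rewrite author's own statement) =====
-- stated objective: alternative
-- what changed: Replaces the single-pass defaultdict bucket-append loop with a two-phase strategy: first compute the distinct verticals in first-occurrence order (dict.fromkeys), then build each group by an independent filter pass over the input.
import Mathlib
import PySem

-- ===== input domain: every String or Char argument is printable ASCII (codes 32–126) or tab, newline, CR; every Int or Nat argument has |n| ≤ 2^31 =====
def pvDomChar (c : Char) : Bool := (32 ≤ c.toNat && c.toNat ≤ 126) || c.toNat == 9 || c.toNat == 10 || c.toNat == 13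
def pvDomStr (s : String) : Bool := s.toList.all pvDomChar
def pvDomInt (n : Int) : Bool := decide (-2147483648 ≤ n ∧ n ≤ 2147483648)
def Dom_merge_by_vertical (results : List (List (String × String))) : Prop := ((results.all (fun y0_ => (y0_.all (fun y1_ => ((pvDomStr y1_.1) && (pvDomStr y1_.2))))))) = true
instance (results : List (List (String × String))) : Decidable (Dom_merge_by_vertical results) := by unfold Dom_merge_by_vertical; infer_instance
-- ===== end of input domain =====

-- B groups by the same key but in two phases (distinct keys, then one filter pass per key)
-- instead of A's single-pass defaultdict bucket append; same result, different decomposition.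

-- r.get('vertical', 'unknown')
def pvKey (r : List (String × String)) : String :=
  (PySem.Dict.mk r).getD "vertical" "unknown"

-- ===== PORT A =====
def merge_by_vertical (results : List (List (String × String))) : List (String × List (List (String × String))) :=
  (results.foldl
    (fun d r => d.modify (pvKey r) [] (fun xs => xs ++ [r]))
    PySem.Dict.empty).items

-- ===== PORT B =====
def merge_by_vertical_alt (results : List (List (String × String))) : List (String × List (List (String × String))) :=
  (PySem.List.dedup (results.map pvKey)).map
    (fun v => (v, results.filter (fun r => pvKey r == v)))

-- ===== PRECONDITION & SPEC =====
def Spec_merge_by_vertical (results : List (List (String × String))) (out : List (String × List (List (String × String)))) : Prop := out = merge_by_vertical_alt results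
instance (results : List (List (String × String))) (out : List (String × List (List (String × String)))) : Decidable (Spec_merge_by_vertical results out) := by unfold Spec_merge_by_vertical; infer_instance

-- ===== CLAIM (what is proved, stated in full; the proofs are below) =====
def Claim_equal_merge_by_vertical : Prop := ∀ (results : List (List (String × String))), Dom_merge_by_vertical results → Spec_merge_by_vertical results (merge_by_vertical results)

-- ===== LEMMAS AND PROOFS =====

-- A's grouping loop, rewritten over (key, value) pairs so the library grouping lemmas apply.
theorem pvFoldl_pairs (results : List (List (String × String))) :
    results.foldl (fun d r => d.modify (pvKey r) [] (fun xs => xs ++ [r])) PySem.Dict.empty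
      = (results.map (fun r => (pvKey r, r))).foldl
          (fun d p => d.modify p.1 [] (fun xs => xs ++ [p.2])) PySem.Dict.empty := by
  rw [List.foldl_map]

theorem pvKeys_eq (results : List (List (String × String))) :
    (results.foldl (fun d r => d.modify (pvKey r) [] (fun xs => xs ++ [r])) PySem.Dict.empty).keys
      = PySem.List.dedup (results.map pvKey) := by
  rw [PySem.Dict.keys_foldl_modify_key]
  simp [PySem.Dict.keys_empty, PySem.Set.update, PySem.List.dedup_eq_ofList, PySem.Set.ofList_eq_foldl]

theorem pvGetD_eq (results : List (List (String × String))) (v : String) :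
    (results.foldl (fun d r => d.modify (pvKey r) [] (fun xs => xs ++ [r])) PySem.Dict.empty).getD v []
      = results.filter (fun r => pvKey r == v) := by
  rw [pvFoldl_pairs, PySem.Dict.getD_foldl_modify_append]
  simp [List.filter_map, List.map_map, Function.comp_def]

-- ===== VERDICT (by name: the statement is the Claim_ definition above) =====
theorem merge_by_vertical_spec : Claim_equal_merge_by_vertical := by
  intro results _
  show merge_by_vertical results = merge_by_vertical_alt results
  unfold merge_by_vertical merge_by_vertical_alt
  rw [PySem.Dict.items_eq_map_keys _ ?nd ([] : List (List (String × String)))]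
  case nd =>
    exact PySem.Dict.nodup_keys_foldl_modify_key _ _ _ _ _ PySem.Dict.nodup_keys_empty
  rw [pvKeys_eq]
  exact List.map_congr_left (fun v _ => by rw [pvGetD_eq])
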